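-- pv_equiv track=rewrite | github.com/marea8888/Fantacalcio2025 | app.py | parse_pfcrange_cell
-- ===== SOURCE A (Python) =====
-- def parse_pfcrange_cell(val):
--     try:
--         if val is None:
--             return (None, None)
--         s = str(val)
--         nums, buf = [], ''
--         for ch in s:
--             if ch.isdigit():
--                 buf += ch
--             else:
--                 if buf:
--                     nums.append(int(buf)); buf=''
--         if buf:
--             nums.append(int(buf))
--         if len(nums) >= 2:
--             a,b = nums[0], nums[1]
--             return (a,b) if a<=b else (b,a)
--         if len(nums) == 1:
--             return (nums[0], nums[0])
--         return (None, None)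
--     except Exception:
--         return (None, None)
-- ===== SOURCE B (Python) =====
-- def parse_pfcrange_cell(val):
--     try:
--         if val is None:
--             return (None, None)
--         masked = ''.join(ch if ch.isdigit() else ' ' for ch in str(val))
--         nums = [int(tok) for tok in masked.split()]
--         if len(nums) >= 2:
--             lo, hi = sorted(nums[:2])
--             return (lo, hi)
--         if len(nums) == 1:
--             return (nums[0], nums[0])
--         return (None, None)
--     except Exception:
--         return (None, None)
-- ===== Notes on version B (the rewrite author's own statement) =====
-- stated objective: idiomatic
-- what changed: Replaces the hand-written stateful character loop with explicit buffer/flush bookkeeping by a mask-then-split tokenization: non-digits are mapped to spaces and str.split() yields the digit runs in one expression.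
import Mathlib
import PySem

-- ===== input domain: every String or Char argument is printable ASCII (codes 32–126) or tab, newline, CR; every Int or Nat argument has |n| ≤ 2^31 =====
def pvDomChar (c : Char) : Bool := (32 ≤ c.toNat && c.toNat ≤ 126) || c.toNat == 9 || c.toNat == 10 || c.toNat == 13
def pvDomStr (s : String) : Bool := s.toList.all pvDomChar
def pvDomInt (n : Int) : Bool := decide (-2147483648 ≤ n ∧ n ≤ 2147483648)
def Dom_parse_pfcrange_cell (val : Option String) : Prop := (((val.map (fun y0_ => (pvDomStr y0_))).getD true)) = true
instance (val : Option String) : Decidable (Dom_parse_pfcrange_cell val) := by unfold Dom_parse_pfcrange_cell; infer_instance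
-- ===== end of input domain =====

-- B replaces A's stateful buffer/flush character loop by mask-to-spaces + str.split() tokenization (idiomatic, same cost).

-- int(t) for a run of ASCII digits, exact there (shared helper of both ports).
def pvDigitsToInt (l : List Char) : Int := l.foldl (fun a c => 10 * a + ((c.toNat : Int) - 48)) 0

-- ===== PORT A =====
-- one step of A's `for ch in s` loop over state (nums, buf)
def pvStepA (st : List Int × List Char) (c : Char) : List Int × List Char :=
  if c.isDigit then (st.1, st.2 ++ [c])
  else if st.2 ≠ [] then (st.1 ++ [pvDigitsToInt st.2], []) else st

def parse_pfcrange_cell (val : Option String) : Option Int × Option Int :=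
  match val with
  | none => (none, none)
  | some s =>
    let st := s.toList.foldl pvStepA ([], [])
    let nums := if st.2 ≠ [] then st.1 ++ [pvDigitsToInt st.2] else st.1
    match nums with
    | a :: b :: _ => if a ≤ b then (some a, some b) else (some b, some a)
    | [a] => (some a, some a)
    | [] => (none, none)

-- ===== PORT B =====
-- `ch if ch.isdigit() else ' '`
def pvMaskChar (c : Char) : Char := if c.isDigit then c else ' '

def parse_pfcrange_cell_alt (val : Option String) : Option Int × Option Int :=
  match val with
  | none => (none, none)
  | some s =>
    let nums := (PySem.Str.split₀ (String.ofList (s.toList.map pvMaskChar))).map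
      (fun t => pvDigitsToInt t.toList)
    match nums with
    | a :: b :: _ => (some (min a b), some (max a b))
    | [a] => (some a, some a)
    | [] => (none, none)

-- ===== PRECONDITION & SPEC =====
def Spec_parse_pfcrange_cell (val : Option String) (out : Option Int × Option Int) : Prop := out = parse_pfcrange_cell_alt val
instance (val : Option String) (out : Option Int × Option Int) : Decidable (Spec_parse_pfcrange_cell val out) := by unfold Spec_parse_pfcrange_cell; infer_instance

-- ===== CLAIM (what is proved, stated in full; the proofs are below) =====
def Claim_equal_parse_pfcrange_cell : Prop := ∀ (val : Option String), Dom_parse_pfcrange_cell val → Spec_parse_pfcrange_cell val (parse_pfcrange_cell val)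

-- ===== LEMMAS AND PROOFS =====

-- masking turns exactly the non-digits into whitespace
theorem pvIsspace_mask (c : Char) :
    PySem.Chars.isspace (pvMaskChar c) = !c.isDigit := by
  by_cases h : c.isDigit
  · have h' : 48 ≤ c.toNat ∧ c.toNat ≤ 57 := by
      simp [Char.isDigit] at h
      exact ⟨h.1, h.2⟩
    simp only [pvMaskChar, h, Bool.not_true, PySem.Chars.isspace, if_true]
    simp only [Bool.or_eq_false_iff, decide_eq_false_iff_not, Bool.and_eq_false_iff]
    omega
  · simp [pvMaskChar, h, PySem.Chars.isspace]

-- A's fold with final flush equals split₀'s worker on the masked list, for any in-flight buffer/accumulator.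
theorem pvLoop_eq_split (l : List Char) :
    ∀ (buf : List Char) (acc : List (List Char)),
      (if (l.foldl pvStepA (List.map pvDigitsToInt acc.reverse, buf)).2 ≠ [] then
        (l.foldl pvStepA (List.map pvDigitsToInt acc.reverse, buf)).1
          ++ [pvDigitsToInt (l.foldl pvStepA (List.map pvDigitsToInt acc.reverse, buf)).2]
       else (l.foldl pvStepA (List.map pvDigitsToInt acc.reverse, buf)).1)
      = (PySem.Chars.split₀.go (l.map pvMaskChar) buf.reverse acc).map pvDigitsToInt := by
  induction l with
  | nil =>
    intro buf acc
    by_cases hb : buf = []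
    · subst hb; simp [PySem.Chars.split₀.go]
    · simp [PySem.Chars.split₀.go, hb, List.isEmpty_iff]
  | cons c cs ih =>
    intro buf acc
    simp only [List.foldl_cons, List.map_cons]
    rw [PySem.Chars.split₀.go]
    simp only [pvIsspace_mask]
    by_cases hd : c.isDigit
    · simp only [hd, Bool.not_true, Bool.false_eq_true, if_false]
      rw [show pvStepA (List.map pvDigitsToInt acc.reverse, buf) c
            = (List.map pvDigitsToInt acc.reverse, buf ++ [c]) from by
        simp [pvStepA, hd]]
      rw [show pvMaskChar c :: buf.reverse = (buf ++ [c]).reverse from by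
        simp [pvMaskChar, hd]]
      exact ih (buf ++ [c]) acc
    · simp only [hd, Bool.not_false, if_true]
      by_cases hb : buf = []
      · subst hb
        rw [show pvStepA (List.map pvDigitsToInt acc.reverse, ([] : List Char)) c
              = (List.map pvDigitsToInt acc.reverse, []) from by
          simp [pvStepA, hd]]
        simpa using ih [] acc
      · rw [show pvStepA (List.map pvDigitsToInt acc.reverse, buf) c
              = (List.map pvDigitsToInt (buf :: acc).reverse, []) from by
          simp [pvStepA, hd, hb]]
        have he : buf.reverse.isEmpty = false := by simp [hb]
        rw [he]
        simp only [Bool.false_eq_true, if_false, List.reverse_reverse]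
        simpa using ih [] (buf :: acc)

-- ===== VERDICT (by name: the statement is the Claim_ definition above) =====
theorem parse_pfcrange_cell_spec : Claim_equal_parse_pfcrange_cell := by
  intro val _
  unfold Spec_parse_pfcrange_cell
  match val with
  | none => rfl
  | some s =>
    have h := pvLoop_eq_split s.toList [] []
    simp only [List.reverse_nil, List.map_nil] at h
    simp only [parse_pfcrange_cell, parse_pfcrange_cell_alt, PySem.Str.split₀,
      PySem.Chars.split₀, String.toList_ofList, List.map_map, Function.comp_def]
    rw [← h]
    generalize (if (s.toList.foldl pvStepA ([], [])).2 ≠ [] then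
        (s.toList.foldl pvStepA ([], [])).1 ++ [pvDigitsToInt (s.toList.foldl pvStepA ([], [])).2]
      else (s.toList.foldl pvStepA ([], [])).1) = nums
    match nums with
    | [] => rfl
    | [a] => rfl
    | a :: b :: t =>
      by_cases hab : a ≤ b
      · simp [hab]
      · have hba : b ≤ a := le_of_not_ge hab
        simp [hab, min_eq_right hba, max_eq_left hba]
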